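-- pv_equiv track=rewrite | github.com/cybelewang/leetcode-python | code936StampingTheSequence.py | movesToStamp_WRONG
-- ===== SOURCE A (Python) =====
-- def movesToStamp_WRONG(stamp, target):
--     start, init = 0, []
--     # find all occurances of stamp in target and put their intervals into init list
--     while start < len(target):
--         f = target.find(stamp, start)
--         if f == -1:
--             break
--         init.append([f, f + len(stamp)-1]) # [start, end] inclusive
--         start = f + len(stamp)
--
--     res = []
--     # expand the covered range to whole target
--     def expand(target, stamp, s, e, build):
--         m, n = len(stamp), len(target)
--         if s == 0 and e == n - 1:
--             res.append(build[::-1])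
--             return
--         if s > 0:
--             # expand left
--             for k in range(m, 0, -1):
--                 if s - k >= 0 and target[s-k:s] == stamp[:k]:
--                     s = s - k
--                     build.append(s)
--                     break
--             else:
--                 return
--
--         if e < n - 1:
--             # expand right
--             for k in range(m, 0, -1):
--                 if e + k < n and target[e+1:e+k+1] == stamp[m-k:]:
--                     e = e + k
--                     build.append(e-m+1)
--                     break
--             else:
--                 return
--
--         expand(target, stamp, s, e, build)
--
--     for s, e in init:
--         expand(target, stamp, s, e, [s])
--         if len(res) > 0:
--             return res[0]
--
--     return res
-- ===== SOURCE B (Python) =====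
-- def movesToStamp_WRONG(stamp, target):
--     m, n = len(stamp), len(target)
--     # occurrence-finding outer pass (unchanged by design)
--     init = []
--     start = 0
--     while start < n:
--         f = target.find(stamp, start)
--         if f == -1:
--             break
--         init.append((f, f + m - 1))
--         start = f + m
--
--     for s, e in init:
--         build = [s]
--         while not (s == 0 and e == n - 1):
--             if s > 0:
--                 k = next((k for k in range(m, 0, -1)
--                           if s - k >= 0 and target[s-k:s] == stamp[:k]), None)
--                 if k is None:
--                     break
--                 s -= k
--                 build.append(s)
--             if e < n - 1:
--                 k = next((k for k in range(m, 0, -1)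
--                           if e + k < n and target[e+1:e+k+1] == stamp[m-k:]), None)
--                 if k is None:
--                     break
--                 e += k
--                 build.append(e - m + 1)
--         else:
--             return build[::-1]
--     return []
-- ===== Notes on version B (the rewrite author's own statement) =====
-- stated objective: alternative
-- what changed: The recursive expand helper (with its for-else scans and the result collected by mutating an outer res list) is replaced by an explicit while loop with while-else, maintaining s, e and build directly and extracting the greedy k via next(generator, None); the occurrence-finding outer pass is kept.
import Mathlib
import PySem

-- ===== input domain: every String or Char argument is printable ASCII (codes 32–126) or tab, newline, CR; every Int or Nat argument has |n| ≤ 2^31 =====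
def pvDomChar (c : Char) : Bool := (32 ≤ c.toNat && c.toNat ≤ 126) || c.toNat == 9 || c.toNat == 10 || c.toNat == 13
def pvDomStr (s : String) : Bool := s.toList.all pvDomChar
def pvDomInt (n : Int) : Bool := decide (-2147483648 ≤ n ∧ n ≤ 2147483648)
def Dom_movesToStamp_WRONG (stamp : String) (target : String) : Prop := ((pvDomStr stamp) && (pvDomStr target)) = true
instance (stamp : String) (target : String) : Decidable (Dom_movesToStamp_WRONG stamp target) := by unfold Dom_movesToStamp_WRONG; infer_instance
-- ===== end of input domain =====

-- B rewrites A's recursive `expand` helper as an explicit while-loop with two step helpers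
-- (same greedy, different decomposition); return value only, no mutation observable.

-- ===== PORT A =====

-- while start < len(target): f = target.find(stamp, start); … ; start = f + len(stamp)
-- (fuel ≥ len(target)+1 iterations suffice whenever stamp ≠ '', i.e. inside Pre_)
def pvOccA (stamp target : List Char) (start : Int) : Nat → List (Int × Int)
  | 0 => []
  | fuel + 1 =>
    if start < (target.length : Int) then
      let f := PySem.Chars.findFrom target stamp start none
      if f = -1 then []
      else (f, f + stamp.length - 1) :: pvOccA stamp target (f + stamp.length) fuel
    else []

-- the left for-k-in-range(m,0,-1) loop of expand: some new_s on break, none on fall-through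
def pvLeftA (target stamp : List Char) (s : Int) : List Int → Option Int
  | [] => none
  | k :: ks =>
    if s - k ≥ 0 ∧ PySem.List.slice target (some (s - k)) (some s) = PySem.List.slice stamp none (some k) then
      some (s - k)
    else pvLeftA target stamp s ks

-- the right for-k-in-range(m,0,-1) loop of expand: some new_e on break, none on fall-through
def pvRightA (target stamp : List Char) (e : Int) : List Int → Option Int
  | [] => none
  | k :: ks =>
    if e + k < (target.length : Int) ∧
        PySem.List.slice target (some (e + 1)) (some (e + k + 1)) =
          PySem.List.slice stamp (some ((stamp.length : Int) - k)) none then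
      some (e + k)
    else pvRightA target stamp e ks

-- the recursive expand(target, stamp, s, e, build); build is consed at the HEAD here, so it is
-- Python's build already reversed and res.append(build[::-1]) is modelled as `some build`
def pvExpandA (target stamp : List Char) (s e : Int) (build : List Int) : Nat → Option (List Int)
  | 0 => none
  | fuel + 1 =>
    if s = 0 ∧ e = (target.length : Int) - 1 then some build
    else
      if s > 0 then
        match pvLeftA target stamp s (PySem.List.pyRange (stamp.length : Int) 0 (-1)) with
        | none => none
        | some s' =>
          if e < (target.length : Int) - 1 then
            match pvRightA target stamp e (PySem.List.pyRange (stamp.length : Int) 0 (-1)) with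
            | none => none
            | some e' => pvExpandA target stamp s' e' ((e' - stamp.length + 1) :: s' :: build) fuel
          else pvExpandA target stamp s' e (s' :: build) fuel
      else
        if e < (target.length : Int) - 1 then
          match pvRightA target stamp e (PySem.List.pyRange (stamp.length : Int) 0 (-1)) with
          | none => none
          | some e' => pvExpandA target stamp s e' ((e' - stamp.length + 1) :: build) fuel
        else pvExpandA target stamp s e build fuel

-- for s, e in init: expand(…, [s]); if len(res) > 0: return res[0];  return res
def pvOuterA (target stamp : List Char) : List (Int × Int) → List Int
  | [] => []
  | (s, e) :: rest =>
    match pvExpandA target stamp s e [s] (2 * target.length + 2) with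
    | some b => b
    | none => pvOuterA target stamp rest

def movesToStamp_WRONG (stamp : String) (target : String) : List Int :=
  pvOuterA target.toList stamp.toList
    (pvOccA stamp.toList target.toList 0 (target.toList.length + 1))

-- ===== PORT B =====

-- same outer occurrence pass as in Source B (its `init.append` kept as an accumulator)
def pvOccB (stamp target : List Char) (start : Int) (acc : List (Int × Int)) : Nat → List (Int × Int)
  | 0 => acc.reverse
  | fuel + 1 =>
    if start < (target.length : Int) then
      let f := PySem.Chars.findFrom target stamp start none
      if f = -1 then acc.reverse
      else pvOccB stamp target (f + stamp.length) ((f, f + stamp.length - 1) :: acc) fuel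
    else acc.reverse

-- k = next((k for k in range(m,0,-1) if …), None)   (left side)
def pvFindLeftK (target stamp : List Char) (s : Int) : List Int → Option Int
  | [] => none
  | k :: ks =>
    if s - k ≥ 0 ∧ PySem.List.slice target (some (s - k)) (some s) = PySem.List.slice stamp none (some k) then
      some k
    else pvFindLeftK target stamp s ks

-- k = next((k for k in range(m,0,-1) if …), None)   (right side)
def pvFindRightK (target stamp : List Char) (e : Int) : List Int → Option Int
  | [] => none
  | k :: ks =>
    if e + k < (target.length : Int) ∧
        PySem.List.slice target (some (e + 1)) (some (e + k + 1)) =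
          PySem.List.slice stamp (some ((stamp.length : Int) - k)) none then
      some k
    else pvFindRightK target stamp e ks

-- first half of the while body: `if s > 0: k = next(…); if k is None: break; s -= k; build.append(s)`
def pvStepLeftB (target stamp : List Char) (s : Int) (build : List Int) : Option (Int × List Int) :=
  if s > 0 then
    match pvFindLeftK target stamp s (PySem.List.pyRange (stamp.length : Int) 0 (-1)) with
    | none => none
    | some k => some (s - k, (s - k) :: build)
  else some (s, build)

-- second half of the while body: `if e < n - 1: k = next(…); if k is None: break; e += k; build.append(e-m+1)`
def pvStepRightB (target stamp : List Char) (e : Int) (build : List Int) : Option (Int × List Int) :=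
  if e < (target.length : Int) - 1 then
    match pvFindRightK target stamp e (PySem.List.pyRange (stamp.length : Int) 0 (-1)) with
    | none => none
    | some k => some (e + k, (e + k - stamp.length + 1) :: build)
  else some (e, build)

-- while not (s == 0 and e == n - 1): …  else: return build[::-1]   (none = break, i.e. no result;
-- build is consed at the HEAD, so it is Python's build already reversed and build[::-1] is `build`)
def pvLoopB (target stamp : List Char) (s e : Int) (build : List Int) : Nat → Option (List Int)
  | 0 => none
  | fuel + 1 =>
    if s = 0 ∧ e = (target.length : Int) - 1 then some build
    else
      match pvStepLeftB target stamp s build with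
      | none => none
      | some (s', build₁) =>
        match pvStepRightB target stamp e build₁ with
        | none => none
        | some (e', build₂) => pvLoopB target stamp s' e' build₂ fuel

-- for s, e in init: run the while loop from build = [s]; first full cover wins; else []
def pvRunB (target stamp : List Char) : List (Int × Int) → List Int
  | [] => []
  | (s, e) :: rest =>
    match pvLoopB target stamp s e [s] (2 * target.length + 2) with
    | some b => b
    | none => pvRunB target stamp rest

def movesToStamp_WRONG_alt (stamp : String) (target : String) : List Int :=
  pvRunB target.toList stamp.toList
    (pvOccB stamp.toList target.toList 0 [] (target.toList.length + 1))

-- ===== PRECONDITION & SPEC =====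
-- no Pre_: the two ports agree on EVERY input.  (On stamp = "" with target ≠ "" both Pythons
-- diverge — no value is returned there — while both ports run out of fuel identically.)
def Spec_movesToStamp_WRONG (stamp : String) (target : String) (out : List Int) : Prop := out = movesToStamp_WRONG_alt stamp target
instance (stamp : String) (target : String) (out : List Int) : Decidable (Spec_movesToStamp_WRONG stamp target out) := by unfold Spec_movesToStamp_WRONG; infer_instance

-- ===== CLAIM (what is proved, stated in full; the proofs are below) =====
def Claim_equal_movesToStamp_WRONG : Prop := ∀ (stamp : String) (target : String), Dom_movesToStamp_WRONG stamp target → Spec_movesToStamp_WRONG stamp target (movesToStamp_WRONG stamp target)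

-- ===== LEMMAS AND PROOFS =====

theorem pvOcc_eq (stamp target : List Char) (fuel : Nat) :
    ∀ (start : Int) (acc : List (Int × Int)),
      pvOccB stamp target start acc fuel = acc.reverse ++ pvOccA stamp target start fuel := by
  induction fuel with
  | zero => intro start acc; simp [pvOccA, pvOccB]
  | succ fuel ih =>
    intro start acc
    simp only [pvOccA, pvOccB]
    split_ifs <;> simp [ih]

theorem pvLeftA_eq (target stamp : List Char) (s : Int) (ks : List Int) :
    pvLeftA target stamp s ks = (pvFindLeftK target stamp s ks).map (fun k => s - k) := by
  induction ks with
  | nil => rfl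
  | cons k ks ih =>
    simp only [pvLeftA, pvFindLeftK]
    split_ifs <;> simp [ih]

theorem pvRightA_eq (target stamp : List Char) (e : Int) (ks : List Int) :
    pvRightA target stamp e ks = (pvFindRightK target stamp e ks).map (fun k => e + k) := by
  induction ks with
  | nil => rfl
  | cons k ks ih =>
    simp only [pvRightA, pvFindRightK]
    split_ifs <;> simp [ih]

theorem pvExpand_eq (target stamp : List Char) (fuel : Nat) :
    ∀ (s e : Int) (build : List Int),
      pvExpandA target stamp s e build fuel = pvLoopB target stamp s e build fuel := by
  induction fuel with
  | zero => intro s e build; rfl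
  | succ fuel ih =>
    intro s e build
    simp only [pvExpandA, pvLoopB, pvStepLeftB, pvStepRightB, pvLeftA_eq, pvRightA_eq]
    by_cases hdone : s = 0 ∧ e = (target.length : Int) - 1
    · simp [hdone]
    · simp only [if_neg hdone]
      by_cases hs : s > 0
      · simp only [if_pos hs]
        cases pvFindLeftK target stamp s (PySem.List.pyRange (stamp.length : Int) 0 (-1)) with
        | none => simp
        | some k =>
          simp only [Option.map_some]
          by_cases he : e < (target.length : Int) - 1
          · simp only [if_pos he]
            cases pvFindRightK target stamp e (PySem.List.pyRange (stamp.length : Int) 0 (-1)) with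
            | none => simp
            | some k2 => simp [ih]
          · simp [if_neg he, ih]
      · simp only [if_neg hs]
        by_cases he : e < (target.length : Int) - 1
        · simp only [if_pos he]
          cases pvFindRightK target stamp e (PySem.List.pyRange (stamp.length : Int) 0 (-1)) with
          | none => simp
          | some k2 => simp [ih]
        · simp [if_neg he, ih]

theorem pvOuter_eq (target stamp : List Char) (init : List (Int × Int)) :
    pvOuterA target stamp init = pvRunB target stamp init := by
  induction init with
  | nil => rfl
  | cons p rest ih =>
    obtain ⟨s, e⟩ := p
    simp only [pvOuterA, pvRunB, pvExpand_eq, ih]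

-- ===== VERDICT (by name: the statement is the Claim_ definition above) =====
theorem movesToStamp_WRONG_spec : Claim_equal_movesToStamp_WRONG := by
  intro stamp target _
  unfold Spec_movesToStamp_WRONG movesToStamp_WRONG movesToStamp_WRONG_alt
  rw [pvOcc_eq, pvOuter_eq]
  simp
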